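-- pv_equiv track=rewrite | github.com/gaestu/SurfSifter | src/extractors/browser/firefox/storage/_parsers.py | decode_firefox_scope
-- ===== SOURCE A (Python) =====
-- def decode_firefox_scope(scope: str) -> str:
--     """
--     Decode Firefox webappsstore scope to origin.
--
--     Scope format: moc.elpmaxe.:https:443
--     Firefox stores domain parts individually reversed, then in reverse order
--     moc = com reversed, elpmaxe = example reversed
--     So "moc.elpmaxe." decodes to "example.com"
--     """
--     if not scope:
--         return ""
--
--     parts = scope.split(":")
--     if len(parts) >= 2:
--         reversed_host = parts[0]
--         scheme = parts[1] if len(parts) > 1 else "https"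
--         port = parts[2] if len(parts) > 2 else ""
--
--         # Decode: each part is individually reversed, then order is reversed
--         host_parts = [p[::-1] for p in reversed_host.split(".") if p]
--         host = ".".join(reversed(host_parts))
--
--         origin = f"{scheme}://{host}"
--         if port and port not in ("80", "443", ""):
--             origin += f":{port}"
--         return origin
--
--     return scope
-- ===== SOURCE B (Python) =====
-- def decode_firefox_scope(scope: str) -> str:
--     """Decode Firefox webappsstore scope to origin.
--
--     Single forward pass over the stored host: characters are prepended to the
--     current segment (un-reversing it) and each finished segment is pushed onto
--     the FRONT of the host built so far (un-reversing the segment order), so no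
--     split/map/reverse/join staging is needed.
--     """
--     if not scope:
--         return ""
--     parts = scope.split(":")
--     if len(parts) < 2:
--         return scope
--     host = ""
--     cur = ""
--     for ch in parts[0]:
--         if ch == ".":
--             if cur:
--                 host = cur if not host else cur + "." + host
--             cur = ""
--         else:
--             cur = ch + cur
--     if cur:
--         host = cur if not host else cur + "." + host
--     origin = parts[1] + "://" + host
--     port = parts[2] if len(parts) > 2 else ""
--     if port not in ("80", "443", ""):
--         origin += ":" + port
--     return origin
-- ===== Notes on version B (the rewrite author's own statement) =====
-- stated objective: alternative
-- what changed: A decodes the host with four staged passes (split on '.', filter, per-segment reversal, reversed join); B replaces them by one forward pass with a two-string accumulator that prepends characters to the current segment and pushes finished segments onto the front of the host.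
import Mathlib
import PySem

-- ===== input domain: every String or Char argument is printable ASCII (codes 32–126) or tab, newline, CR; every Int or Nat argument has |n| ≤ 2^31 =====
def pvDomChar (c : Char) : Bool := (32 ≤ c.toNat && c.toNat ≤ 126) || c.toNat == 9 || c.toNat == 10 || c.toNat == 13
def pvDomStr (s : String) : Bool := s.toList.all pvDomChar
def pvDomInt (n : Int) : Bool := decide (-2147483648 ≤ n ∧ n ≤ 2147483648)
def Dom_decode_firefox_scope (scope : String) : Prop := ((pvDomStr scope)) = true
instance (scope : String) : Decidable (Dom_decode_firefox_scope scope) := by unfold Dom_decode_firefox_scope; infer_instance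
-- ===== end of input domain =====

-- B replaces A's staged host decoding (split on '.', filter, per-segment reversal, reversed
-- join) by ONE forward pass with a two-string accumulator (objective: alternative).
-- Equivalence of the return value is proved for all inputs; neither program has side effects.

-- ===== PORT A =====
def decode_firefox_scope (scope : String) : String :=
  if scope = "" then "" else
  let parts := PySem.Chars.splitOn scope.toList [':']
  if 2 ≤ parts.length then
    let reversed_host := parts.getD 0 []
    let scheme := if 1 < parts.length then parts.getD 1 [] else "https".toList
    let port := if 2 < parts.length then parts.getD 2 [] else []
    -- [p[::-1] for p in reversed_host.split(".") if p]
    let host_parts := ((PySem.Chars.splitOn reversed_host ['.']).filter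
        (fun q => decide (q ≠ []))).map (fun q => (PySem.List.slice? q none none (-1)).getD [])
    -- ".".join(reversed(host_parts))
    let host := PySem.Chars.join ['.'] host_parts.reverse
    let origin := scheme ++ (':' :: '/' :: '/' :: host)
    if port ≠ [] ∧ ¬(port = "80".toList ∨ port = "443".toList ∨ port = []) then
      String.ofList (origin ++ ':' :: port)
    else String.ofList origin
  else scope

-- ===== PORT B =====
-- Source B's in-loop push: host = cur if not host else cur + "." + host  (skipped when cur empty)
def pvAltFlush (cur host : List Char) : List Char :=
  if cur = [] then host else if host = [] then cur else cur ++ '.' :: host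

-- one loop iteration of Source B's forward pass over the stored host
def pvAltStep (st : List Char × List Char) (ch : Char) : List Char × List Char :=
  if ch = '.' then ([], pvAltFlush st.1 st.2) else (ch :: st.1, st.2)

def decode_firefox_scope_alt (scope : String) : String :=
  if scope = "" then "" else
  let parts := PySem.Chars.splitOn scope.toList [':']
  if parts.length < 2 then scope else
  let st := (parts.getD 0 []).foldl pvAltStep ([], [])
  let host := pvAltFlush st.1 st.2
  let origin := (parts.getD 1 []) ++ (':' :: '/' :: '/' :: host)
  let port := if 2 < parts.length then parts.getD 2 [] else []
  if ¬(port = "80".toList ∨ port = "443".toList ∨ port = []) then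
    String.ofList (origin ++ ':' :: port)
  else String.ofList origin

-- ===== PRECONDITION & SPEC =====
def Spec_decode_firefox_scope (scope : String) (out : String) : Prop := out = decode_firefox_scope_alt scope
instance (scope : String) (out : String) : Decidable (Spec_decode_firefox_scope scope out) := by unfold Spec_decode_firefox_scope; infer_instance

-- ===== CLAIM (what is proved, stated in full; the proofs are below) =====
def Claim_equal_decode_firefox_scope : Prop := ∀ (scope : String), Dom_decode_firefox_scope scope → Spec_decode_firefox_scope scope (decode_firefox_scope scope)

-- ===== LEMMAS AND PROOFS =====

-- PySem.Chars.splitOn with a one-character separator is List.splitOnP of matching that character.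
theorem pv_go_split (c : Char) (l : List Char) : ∀ (fuel : Nat) (cur : List Char)
    (acc : List (List Char)), l.length < fuel →
    PySem.Chars.splitOn.go [c] fuel l cur acc
      = acc.reverse ++ List.modifyHead (cur.reverse ++ ·) (List.splitOnP (fun x => c == x) l) := by
  induction l with
  | nil =>
    intro fuel cur acc hf
    obtain ⟨f, rfl⟩ : ∃ f, fuel = f + 1 := ⟨fuel - 1, by omega⟩
    rw [PySem.Chars.splitOn.go]
    · simp [List.splitOnP_nil]
    · omega
  | cons x rest ih =>
    intro fuel cur acc hf
    obtain ⟨f, rfl⟩ : ∃ f, fuel = f + 1 := ⟨fuel - 1, by omega⟩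
    have hrest : rest.length < f := by simp at hf; omega
    rw [PySem.Chars.splitOn.go]
    · by_cases hc : (c == x) = true
      · rw [if_pos (show List.isPrefixOf [c] (x :: rest) = true from by simp [List.isPrefixOf, hc])]
        rw [show List.drop [c].length (x :: rest) = rest from by simp]
        rw [ih f [] (cur.reverse :: acc) hrest]
        rw [List.splitOnP_cons]
        simp only [hc, if_pos]
        cases hS : List.splitOnP (fun x => c == x) rest with
        | nil => exact absurd hS (List.splitOnP_ne_nil _ _)
        | cons a t => simp [List.modifyHead]
      · have hc' : (c == x) = false := by simpa using hc
        rw [if_neg (show ¬ List.isPrefixOf [c] (x :: rest) = true from by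
          simp [List.isPrefixOf, hc'])]
        rw [ih f (x :: cur) acc hrest]
        rw [List.splitOnP_cons]
        simp only [hc', Bool.false_eq_true, if_false]
        cases hS : List.splitOnP (fun x => c == x) rest with
        | nil => exact absurd hS (List.splitOnP_ne_nil _ _)
        | cons a t => simp [List.modifyHead]

theorem pv_splitOn_eq (c : Char) (s : List Char) :
    PySem.Chars.splitOn s [c] = List.splitOnP (fun x => c == x) s := by
  rw [PySem.Chars.splitOn, pv_go_split c s (s.length + 1) [] [] (Nat.lt_succ_self _)]
  cases hS : List.splitOnP (fun x => c == x) s with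
  | nil => exact absurd hS (List.splitOnP_ne_nil _ _)
  | cons a t => simp [List.modifyHead]

-- splitOnP at a concatenated last element
theorem pv_splitOnP_concat (p : Char → Bool) (x : Char) (u : List Char) :
    List.splitOnP p (u ++ [x])
      = if p x then List.splitOnP p u ++ [[]]
        else List.modifyLast (· ++ [x]) (List.splitOnP p u) := by
  induction u with
  | nil =>
    simp only [List.nil_append, List.splitOnP_cons, List.splitOnP_nil]
    by_cases hx : p x = true <;> simp [hx, List.modifyLast, List.modifyLast.go]
  | cons y u' ih =>
    rw [List.cons_append, List.splitOnP_cons, ih, List.splitOnP_cons]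
    have hne := List.splitOnP_ne_nil p u'
    by_cases hy : p y = true <;> by_cases hx : p x = true <;> simp only [hy, hx, if_pos, if_neg,
      Bool.false_eq_true, not_false_iff]
    · simp
    · rw [show ([] : List Char) :: List.splitOnP p u'
            = [([] : List Char)] ++ List.splitOnP p u' from rfl,
          List.modifyLast_append_of_right_ne_nil _ _ _ hne]
      simp
    · cases hS : List.splitOnP p u' with
      | nil => exact absurd hS hne
      | cons a t => simp [List.modifyHead]
    · cases hS : List.splitOnP p u' with
      | nil => exact absurd hS hne
      | cons a t =>
        cases t with
        | nil => simp [List.modifyHead, List.modifyLast, List.modifyLast.go]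
        | cons b t' =>
          rw [show a :: b :: t' = [a] ++ (b :: t') from rfl,
              List.modifyLast_append_of_right_ne_nil _ _ _ (by simp)]
          simp only [List.modifyHead, List.singleton_append]
          rw [show (y :: a) :: b :: t' = [y :: a] ++ (b :: t') from rfl,
              List.modifyLast_append_of_right_ne_nil _ _ _ (by simp)]
          simp

-- A's staged host computation, as a function of the list of raw dot-segments
def pvJ (xs : List (List Char)) : List Char :=
  PySem.Chars.join ['.'] (((xs.filter (fun q => decide (q ≠ []))).map List.reverse).reverse)

-- a join over nonempty pieces is empty only for the empty list of pieces
theorem pv_join_ne_nil (rest : List (List Char)) (h : ∀ r ∈ rest, r ≠ []) :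
    PySem.Chars.join ['.'] rest = [] ↔ rest = [] := by
  cases rest with
  | nil => simp
  | cons r t =>
    have hr : r ≠ [] := h r (by simp)
    cases t with
    | nil => rw [PySem.Chars.join_singleton]; simp [hr]
    | cons b t' =>
      rw [PySem.Chars.join_cons_cons]
      simp [List.append_eq_nil_iff, hr]

theorem pv_J_concat (xs : List (List Char)) (l : List Char) :
    pvJ (xs ++ [l]) = pvAltFlush l.reverse (pvJ xs) := by
  by_cases hl : l = []
  · simp [pvJ, pvAltFlush, List.filter_append, hl]
  · have hlr : l.reverse ≠ [] := by simpa [List.reverse_eq_nil_iff] using hl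
    have hstep : pvJ (xs ++ [l])
        = PySem.Chars.join ['.']
            (l.reverse :: ((xs.filter (fun q => decide (q ≠ []))).map List.reverse).reverse) := by
      simp [pvJ, List.filter_append, hl]
    rw [hstep]
    have hmem : ∀ r ∈ ((xs.filter (fun q => decide (q ≠ []))).map List.reverse).reverse,
        r ≠ [] := by
      intro r hr
      simp only [List.mem_reverse, List.mem_map] at hr
      obtain ⟨q, hq, rfl⟩ := hr
      simpa [List.reverse_eq_nil_iff] using List.of_mem_filter hq
    cases hR : ((xs.filter (fun q => decide (q ≠ []))).map List.reverse).reverse with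
    | nil =>
      have hJ : pvJ xs = [] := by unfold pvJ; rw [hR]; simp
      rw [PySem.Chars.join_singleton]
      simp [pvAltFlush, hlr, hJ]
    | cons b t' =>
      have hJ : pvJ xs = PySem.Chars.join ['.'] (b :: t') := by unfold pvJ; rw [hR]
      have hJne : pvJ xs ≠ [] := by
        rw [hJ]
        intro hc
        cases (pv_join_ne_nil (b :: t') (hR ▸ hmem)).mp hc
      rw [PySem.Chars.join_cons_cons, ← hJ]
      simp [pvAltFlush, hlr, hJne]

-- loop invariant of Source B's forward pass: current segment = reverse of the open dot-segment,
-- host so far = A's staged computation on the closed dot-segments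
theorem pv_fold_inv (h : List Char) :
    h.foldl pvAltStep ([], [])
      = (((List.splitOnP (fun x => '.' == x) h).getLastD []).reverse,
         pvJ (List.splitOnP (fun x => '.' == x) h).dropLast) := by
  induction h using List.reverseRecOn with
  | nil => simp [List.splitOnP_nil, pvJ]
  | append_singleton u x ih =>
    rw [List.foldl_append, List.foldl_cons, List.foldl_nil, ih, pv_splitOnP_concat]
    have hne := List.splitOnP_ne_nil (fun x => '.' == x) u
    obtain ⟨ys, y, hS⟩ : ∃ ys y, List.splitOnP (fun x => '.' == x) u = ys ++ [y] := by
      rcases List.eq_nil_or_concat (List.splitOnP (fun x => '.' == x) u) with hc | ⟨ys, y, hc⟩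
      · exact absurd hc hne
      · exact ⟨ys, y, by simpa using hc⟩
    by_cases hx : x = '.'
    · rw [if_pos (by simp [hx]), hS]
      simp only [List.getLastD_concat, List.dropLast_concat]
      simp [pvAltStep, hx, pv_J_concat]
    · rw [if_neg (by simp [Ne.symm hx]), hS, List.modifyLast_concat]
      simp only [List.getLastD_concat, List.dropLast_concat]
      simp [pvAltStep, hx]

-- the two host computations agree
theorem pv_host_eq (h : List Char) :
    PySem.Chars.join ['.']
        ((((PySem.Chars.splitOn h ['.']).filter (fun q => decide (q ≠ []))).map
          (fun q => (PySem.List.slice? q none none (-1)).getD [])).reverse)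
      = pvAltFlush (h.foldl pvAltStep ([], [])).1 (h.foldl pvAltStep ([], [])).2 := by
  rw [pv_fold_inv]
  have hne := List.splitOnP_ne_nil (fun x => '.' == x) h
  obtain ⟨ys, y, hS⟩ : ∃ ys y, List.splitOnP (fun x => '.' == x) h = ys ++ [y] := by
    rcases List.eq_nil_or_concat (List.splitOnP (fun x => '.' == x) h) with hc | ⟨ys, y, hc⟩
    · exact absurd hc hne
    · exact ⟨ys, y, by simpa using hc⟩
  have hleft : PySem.Chars.join ['.']
      ((((PySem.Chars.splitOn h ['.']).filter (fun q => decide (q ≠ []))).map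
        (fun q => (PySem.List.slice? q none none (-1)).getD [])).reverse) = pvJ (ys ++ [y]) := by
    simp only [pvJ, pv_splitOn_eq, hS, PySem.List.slice?_none_none_neg_one, Option.getD_some]
  rw [hleft, pv_J_concat, hS]
  simp

-- ===== VERDICT (by name: the statement is the Claim_ definition above) =====
theorem decode_firefox_scope_spec : Claim_equal_decode_firefox_scope := by
  intro scope _
  unfold Spec_decode_firefox_scope decode_firefox_scope decode_firefox_scope_alt
  by_cases h0 : scope = ""
  · simp [h0]
  · rw [if_neg h0, if_neg h0]
    set parts := PySem.Chars.splitOn scope.toList [':'] with hparts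
    by_cases hl : 2 ≤ parts.length
    · rw [if_pos hl, if_neg (show ¬ parts.length < 2 by omega)]
      dsimp only
      rw [if_pos (show 1 < parts.length by omega), pv_host_eq]
      set port := if 2 < parts.length then parts.getD 2 ([] : List Char) else [] with hport
      by_cases hp : (port = "80".toList ∨ port = "443".toList ∨ port = [])
      · rw [if_neg (show ¬(port ≠ [] ∧ ¬(port = "80".toList ∨ port = "443".toList ∨ port = []))
            from fun h => h.2 hp), if_neg (not_not_intro hp)]
      · rw [if_pos (show port ≠ [] ∧ ¬(port = "80".toList ∨ port = "443".toList ∨ port = [])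
            from ⟨fun h => hp (Or.inr (Or.inr h)), hp⟩), if_pos hp]
    · rw [if_neg hl, if_pos (show parts.length < 2 by omega)]
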